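-- pv_equiv track=rewrite | github.com/Digital-Physics/algorithms-to-live-by | scheduling.py | calculate_cumulative_time
-- ===== SOURCE A (Python) =====
-- def calculate_cumulative_time(load_pairs):
--     """
--     Calculate cumulative times for washing and drying with one washer and one dryer.
--
--     Args:
--         load_pairs: List of tuples where each tuple is (wash_time, dry_time).
--
--     Returns:
--         A list of tuples (wash_start_time, wash_end_time, dry_start_time, dry_end_time) for each load.
--     """
--     cumulative_times = []
--     current_wash_end = 0  # When the washer is free
--     current_dry_end = 0  # When the dryer is free
--
--     for wash_time, dry_time in load_pairs:
--         wash_end = current_wash_end + wash_time  # Time when washing ends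
--         dry_start = max(wash_end, current_dry_end)  # Dryer starts after washing ends
--         dry_end = dry_start + dry_time  # Time when drying ends
--
--         cumulative_times.append((current_wash_end, wash_end, dry_start, dry_end))
--
--         current_wash_end = wash_end
--         current_dry_end = dry_end
--
--     return cumulative_times
-- ===== SOURCE B (Python) =====
-- def calculate_cumulative_time(load_pairs):
--     # Pass 1: washer timeline as a table of cumulative wash end-times.
--     ends = [0]
--     e = 0
--     for w, _ in load_pairs:
--         e += w
--         ends.append(e)
--     wash = list(zip(ends, ends[1:]))
--     # Pass 2: consume the wash table with only the running dryer-free time.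
--     out = []
--     dry_end = 0
--     for (ws, we), (_, d) in zip(wash, load_pairs):
--         ds = max(we, dry_end)
--         dry_end = ds + d
--         out.append((ws, we, ds, dry_end))
--     return out
-- ===== Notes on version B (the rewrite author's own statement) =====
-- stated objective: alternative
-- what changed: Replaces A's single fused loop carrying both washer and dryer state by a build-then-consume shape: a first pass precomputes the cumulative wash end-time table, a second pass over that zipped table carries only the running dryer end-time.
import Mathlib
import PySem

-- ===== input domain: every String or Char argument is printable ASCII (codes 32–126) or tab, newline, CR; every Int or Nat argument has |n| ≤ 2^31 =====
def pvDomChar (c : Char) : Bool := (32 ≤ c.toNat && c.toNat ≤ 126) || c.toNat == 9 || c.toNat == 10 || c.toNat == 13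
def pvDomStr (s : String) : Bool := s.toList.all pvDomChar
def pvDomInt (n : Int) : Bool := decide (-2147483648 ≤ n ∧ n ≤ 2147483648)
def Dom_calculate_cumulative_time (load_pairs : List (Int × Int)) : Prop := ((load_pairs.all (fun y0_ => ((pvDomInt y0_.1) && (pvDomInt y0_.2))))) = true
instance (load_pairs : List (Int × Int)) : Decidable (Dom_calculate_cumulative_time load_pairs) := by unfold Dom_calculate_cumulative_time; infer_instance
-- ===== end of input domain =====

-- B replaces A's single fused loop by a build-then-consume decomposition: precompute the cumulative wash end-time table, then a second pass carrying only the running dryer end-time (alternative decomposition, same cost).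


-- ===== PORT A =====
def calculate_cumulative_time (load_pairs : List (Int × Int)) : List (Int × Int × Int × Int) :=
  (load_pairs.foldl
    (fun (s : List (Int × Int × Int × Int) × Int × Int) p =>
      let wash_end := s.2.1 + p.1
      let dry_start := max wash_end s.2.2
      let dry_end := dry_start + p.2
      (s.1 ++ [(s.2.1, wash_end, dry_start, dry_end)], wash_end, dry_end))
    ([], 0, 0)).1

-- ===== PORT B =====
-- B: pass 1 builds the cumulative wash end-time table, pass 2 consumes the zipped table
def calculate_cumulative_time_alt (load_pairs : List (Int × Int)) : List (Int × Int × Int × Int) :=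
  let ends := (load_pairs.foldl
    (fun (s : List Int × Int) p => (s.1 ++ [s.2 + p.1], s.2 + p.1)) ([0], 0)).1
  let wash := List.zip ends ends.tail
  ((List.zip wash load_pairs).foldl
    (fun (s : List (Int × Int × Int × Int) × Int) x =>
      let ds := max x.1.2 s.2
      (s.1 ++ [(x.1.1, x.1.2, ds, ds + x.2.2)], ds + x.2.2))
    ([], 0)).1

-- ===== PRECONDITION & SPEC =====
def Spec_calculate_cumulative_time (load_pairs : List (Int × Int)) (out : List (Int × Int × Int × Int)) : Prop := out = calculate_cumulative_time_alt load_pairs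
instance (load_pairs : List (Int × Int)) (out : List (Int × Int × Int × Int)) : Decidable (Spec_calculate_cumulative_time load_pairs out) := by unfold Spec_calculate_cumulative_time; infer_instance

-- ===== CLAIM (what is proved, stated in full; the proofs are below) =====
def Claim_equal_calculate_cumulative_time : Prop := ∀ (load_pairs : List (Int × Int)), Dom_calculate_cumulative_time load_pairs → Spec_calculate_cumulative_time load_pairs (calculate_cumulative_time load_pairs)

-- ===== LEMMAS AND PROOFS =====

-- ===== VERDICT (by name: the statement is the Claim_ definition above) =====
-- recursive reference versions of the two loops
def aRun : List (Int × Int) → Int → Int → List (Int × Int × Int × Int)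
  | [], _, _ => []
  | (w, d) :: rest, W, D =>
    let we := W + w
    let ds := max we D
    (W, we, ds, ds + d) :: aRun rest we (ds + d)

def endsRun : List (Int × Int) → Int → List Int
  | [], _ => []
  | (w, _) :: rest, e => (e + w) :: endsRun rest (e + w)

def bRun : List ((Int × Int) × (Int × Int)) → Int → List (Int × Int × Int × Int)
  | [], _ => []
  | (⟨ws, we⟩, ⟨_, d⟩) :: rest, D =>
    let ds := max we D
    (ws, we, ds, ds + d) :: bRun rest (ds + d)

theorem aFold_eq (lp : List (Int × Int)) :
    ∀ (acc : List (Int × Int × Int × Int)) (W D : Int),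
    (lp.foldl
      (fun (s : List (Int × Int × Int × Int) × Int × Int) p =>
        let wash_end := s.2.1 + p.1
        let dry_start := max wash_end s.2.2
        let dry_end := dry_start + p.2
        (s.1 ++ [(s.2.1, wash_end, dry_start, dry_end)], wash_end, dry_end))
      (acc, W, D)).1 = acc ++ aRun lp W D := by
  induction lp with
  | nil => intro acc W D; simp [aRun]
  | cons p rest ih =>
    intro acc W D
    obtain ⟨w, d⟩ := p
    simp only [List.foldl_cons, aRun]
    rw [ih]
    simp

theorem endsFold_eq (lp : List (Int × Int)) :
    ∀ (acc : List Int) (e : Int),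
    (lp.foldl (fun (s : List Int × Int) p => (s.1 ++ [s.2 + p.1], s.2 + p.1)) (acc, e)).1
      = acc ++ endsRun lp e := by
  induction lp with
  | nil => intro acc e; simp [endsRun]
  | cons p rest ih =>
    intro acc e
    simp only [List.foldl_cons, endsRun]
    rw [ih]
    simp

theorem bFold_eq (l : List ((Int × Int) × (Int × Int))) :
    ∀ (acc : List (Int × Int × Int × Int)) (D : Int),
    (l.foldl
      (fun (s : List (Int × Int × Int × Int) × Int) x =>
        let ds := max x.1.2 s.2
        (s.1 ++ [(x.1.1, x.1.2, ds, ds + x.2.2)], ds + x.2.2))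
      (acc, D)).1 = acc ++ bRun l D := by
  induction l with
  | nil => intro acc D; simp [bRun]
  | cons x rest ih =>
    intro acc D
    obtain ⟨⟨ws, we⟩, ⟨w, d⟩⟩ := x
    simp only [List.foldl_cons, bRun]
    rw [ih]
    simp

theorem runs_eq (lp : List (Int × Int)) :
    ∀ (W D : Int),
    bRun (List.zip (List.zip (W :: endsRun lp W) (endsRun lp W)) lp) D = aRun lp W D := by
  induction lp with
  | nil => intro W D; simp [endsRun, aRun, bRun]
  | cons p rest ih =>
    intro W D
    obtain ⟨w, d⟩ := p
    simp only [endsRun, aRun, List.zip_cons_cons, bRun]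
    rw [ih]

theorem calculate_cumulative_time_spec : Claim_equal_calculate_cumulative_time := by
  intro lp _
  unfold Spec_calculate_cumulative_time calculate_cumulative_time calculate_cumulative_time_alt
  rw [aFold_eq, endsFold_eq, bFold_eq]
  simp only [List.nil_append]
  cases lp with
  | nil => simp [endsRun, aRun, bRun]
  | cons p rest =>
    obtain ⟨w, d⟩ := p
    simp only [endsRun, List.cons_append, List.nil_append, List.tail_cons]
    exact (runs_eq ((w, d) :: rest) 0 0).symm
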